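-- pv_equiv track=rewrite | github.com/AceTheDactyl/Rosetta-bear-project | fano_polarity/orchestrator.py | _interference_to_cell
-- ===== SOURCE A (Python) =====
-- from typing import Any, Callable, Dict, List, Optional, Tuple
--
-- FANO_LINES: List[Tuple[int, int, int]] = [
--     (1, 2, 3), (1, 4, 5), (1, 6, 7),
--     (2, 4, 6), (2, 5, 7), (3, 4, 7), (3, 5, 6),
-- ]
--
-- def _interference_to_cell(i: int, j: int) -> Tuple[int, int]:
--     """Map interference node (i,j) to cell (seal, face) via Fano structure."""
--     p_i, p_j = i + 1, j + 1  # Convert to 1-indexed points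
--     for line in FANO_LINES:
--         if p_i in line and p_j in line:
--             third = [p for p in line if p not in (p_i, p_j)][0]
--             pts = sorted(line)
--             if (p_i, p_j) == (pts[0], pts[1]):
--                 face = 0
--             elif (p_i, p_j) == (pts[0], pts[2]):
--                 face = 1
--             else:
--                 face = 2
--             return (third, face)
--     return (4, 1)  # Fallback
-- ===== SOURCE B (Python) =====
-- """Precomputed 49-entry table for the 7x7 Fano cell map; function is a single dict lookup."""
--
-- _LOOKUP = {
--     (1,1): (2,2),
--     (1,2): (3,0),
--     (1,3): (2,1),
--     (1,4): (5,0),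
--     (1,5): (4,1),
--     (1,6): (7,0),
--     (1,7): (6,1),
--     (2,1): (3,2),
--     (2,2): (1,2),
--     (2,3): (1,2),
--     (2,4): (6,0),
--     (2,5): (7,0),
--     (2,6): (4,1),
--     (2,7): (5,1),
--     (3,1): (2,2),
--     (3,2): (1,2),
--     (3,3): (1,2),
--     (3,4): (7,0),
--     (3,5): (6,0),
--     (3,6): (5,1),
--     (3,7): (4,1),
--     (4,1): (5,2),
--     (4,2): (6,2),
--     (4,3): (7,2),
--     (4,4): (1,2),
--     (4,5): (1,2),
--     (4,6): (2,2),
--     (4,7): (3,2),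
--     (5,1): (4,2),
--     (5,2): (7,2),
--     (5,3): (6,2),
--     (5,4): (1,2),
--     (5,5): (1,2),
--     (5,6): (3,2),
--     (5,7): (2,2),
--     (6,1): (7,2),
--     (6,2): (4,2),
--     (6,3): (5,2),
--     (6,4): (2,2),
--     (6,5): (3,2),
--     (6,6): (1,2),
--     (6,7): (1,2),
--     (7,1): (6,2),
--     (7,2): (5,2),
--     (7,3): (4,2),
--     (7,4): (3,2),
--     (7,5): (2,2),
--     (7,6): (1,2),
--     (7,7): (1,2),
-- }
--
-- def _interference_to_cell(i: int, j: int) -> tuple: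
--     return _LOOKUP.get((i + 1, j + 1), (4, 1))
-- ===== Notes on version B (the rewrite author's own statement) =====
-- stated objective: simpler
-- what changed: Replaces the per-call scan over FANO_LINES (membership tests, list comprehension, sorting, branch chain) with a precomputed literal 49-entry dict mapping each 1-indexed pair to its (seal, face); the function body is a single dict lookup whose default is the original fallback value.
import Mathlib
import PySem

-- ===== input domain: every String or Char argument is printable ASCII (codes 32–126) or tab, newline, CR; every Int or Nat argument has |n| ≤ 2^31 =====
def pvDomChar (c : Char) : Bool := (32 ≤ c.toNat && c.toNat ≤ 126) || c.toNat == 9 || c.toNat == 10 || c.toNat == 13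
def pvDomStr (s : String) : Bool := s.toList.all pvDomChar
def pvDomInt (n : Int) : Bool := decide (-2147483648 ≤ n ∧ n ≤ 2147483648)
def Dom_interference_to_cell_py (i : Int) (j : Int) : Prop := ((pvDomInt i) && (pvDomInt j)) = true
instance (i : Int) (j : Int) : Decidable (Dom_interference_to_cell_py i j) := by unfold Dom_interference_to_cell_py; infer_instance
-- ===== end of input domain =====

-- B replaces A's line scan with a precomputed 49-entry lookup table; objective: simpler (constant-time table lookup).
-- ===== PORT A =====
def pvFanoLines : List (Int × Int × Int) :=
  [(1,2,3),(1,4,5),(1,6,7),(2,4,6),(2,5,7),(3,4,7),(3,5,6)]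

-- the `for line in FANO_LINES` loop; `p in line` is the disjunction of equalities,
-- `[...][0]` is head (never empty here; Python would raise IndexError on empty, which never happens)
def pvCellLoop (p_i p_j : Int) : List (Int × Int × Int) → Int × Int
  | [] => (4, 1)
  | (a, b, c) :: rest =>
    if (p_i = a ∨ p_i = b ∨ p_i = c) ∧ (p_j = a ∨ p_j = b ∨ p_j = c) then
      let third := (([a, b, c].filter (fun p => !(p == p_i || p == p_j))).head?).getD 0
      let pts := PySem.List.sorted [a, b, c] (fun x => x) false
      let face : Int :=
        if (p_i, p_j) = ((PySem.List.pyGet? pts 0).getD 0, (PySem.List.pyGet? pts 1).getD 0) then 0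
        else if (p_i, p_j) = ((PySem.List.pyGet? pts 0).getD 0, (PySem.List.pyGet? pts 2).getD 0) then 1
        else 2
      (third, face)
    else pvCellLoop p_i p_j rest

def interference_to_cell_py (i : Int) (j : Int) : Int × Int :=
  pvCellLoop (i + 1) (j + 1) pvFanoLines

-- ===== PORT B =====
def pvLookup : PySem.Dict (Int × Int) (Int × Int) :=
  PySem.Dict.ofList
  [ ((1,1),(2,2)),
    ((1,2),(3,0)),
    ((1,3),(2,1)),
    ((1,4),(5,0)),
    ((1,5),(4,1)),
    ((1,6),(7,0)),
    ((1,7),(6,1)),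
    ((2,1),(3,2)),
    ((2,2),(1,2)),
    ((2,3),(1,2)),
    ((2,4),(6,0)),
    ((2,5),(7,0)),
    ((2,6),(4,1)),
    ((2,7),(5,1)),
    ((3,1),(2,2)),
    ((3,2),(1,2)),
    ((3,3),(1,2)),
    ((3,4),(7,0)),
    ((3,5),(6,0)),
    ((3,6),(5,1)),
    ((3,7),(4,1)),
    ((4,1),(5,2)),
    ((4,2),(6,2)),
    ((4,3),(7,2)),
    ((4,4),(1,2)),
    ((4,5),(1,2)),
    ((4,6),(2,2)),
    ((4,7),(3,2)),
    ((5,1),(4,2)),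
    ((5,2),(7,2)),
    ((5,3),(6,2)),
    ((5,4),(1,2)),
    ((5,5),(1,2)),
    ((5,6),(3,2)),
    ((5,7),(2,2)),
    ((6,1),(7,2)),
    ((6,2),(4,2)),
    ((6,3),(5,2)),
    ((6,4),(2,2)),
    ((6,5),(3,2)),
    ((6,6),(1,2)),
    ((6,7),(1,2)),
    ((7,1),(6,2)),
    ((7,2),(5,2)),
    ((7,3),(4,2)),
    ((7,4),(3,2)),
    ((7,5),(2,2)),
    ((7,6),(1,2)),
    ((7,7),(1,2)) ]

def interference_to_cell_py_alt (i : Int) (j : Int) : Int × Int :=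
  pvLookup.getD (i + 1, j + 1) (4, 1)

-- ===== PRECONDITION & SPEC =====
def Spec_interference_to_cell_py (i : Int) (j : Int) (out : Int × Int) : Prop := out = interference_to_cell_py_alt i j
instance (i : Int) (j : Int) (out : Int × Int) : Decidable (Spec_interference_to_cell_py i j out) := by unfold Spec_interference_to_cell_py; infer_instance

-- ===== CLAIM (what is proved, stated in full; the proofs are below) =====
def Claim_equal_interference_to_cell_py : Prop := ∀ (i : Int) (j : Int), Dom_interference_to_cell_py i j → Spec_interference_to_cell_py i j (interference_to_cell_py i j)

-- ===== LEMMAS AND PROOFS =====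
lemma pvA_default (i j : Int) (h : i < 0 ∨ 6 < i ∨ j < 0 ∨ 6 < j) :
    interference_to_cell_py i j = (4, 1) := by
  simp only [interference_to_cell_py, pvFanoLines, pvCellLoop]
  split_ifs <;> first | rfl | (exfalso; omega)

set_option maxRecDepth 100000 in
lemma pvKeys : pvLookup.keys = [(1,1),(1,2),(1,3),(1,4),(1,5),(1,6),(1,7),(2,1),(2,2),(2,3),(2,4),(2,5),(2,6),(2,7),(3,1),(3,2),(3,3),(3,4),(3,5),(3,6),(3,7),(4,1),(4,2),(4,3),(4,4),(4,5),(4,6),(4,7),(5,1),(5,2),(5,3),(5,4),(5,5),(5,6),(5,7),(6,1),(6,2),(6,3),(6,4),(6,5),(6,6),(6,7),(7,1),(7,2),(7,3),(7,4),(7,5),(7,6),(7,7)] := by decide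

lemma pvB_default (i j : Int) (h : i < 0 ∨ 6 < i ∨ j < 0 ∨ 6 < j) :
    interference_to_cell_py_alt i j = (4, 1) := by
  simp only [interference_to_cell_py_alt]
  apply PySem.Dict.getD_of_not_contains
  rw [PySem.Dict.contains_eq_decide_mem_keys, pvKeys]
  simp only [List.mem_cons, List.not_mem_nil, or_false, Prod.mk.injEq,
    decide_eq_false_iff_not]
  omega

set_option maxRecDepth 100000 in
lemma pvInRange : ∀ (i j : Int), 0 ≤ i → i ≤ 6 → 0 ≤ j → j ≤ 6 →
    interference_to_cell_py i j = interference_to_cell_py_alt i j := by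
  intro i j h1 h2 h3 h4
  interval_cases i <;> interval_cases j <;> decide

-- ===== VERDICT (by name: the statement is the Claim_ definition above) =====
theorem interference_to_cell_py_spec : Claim_equal_interference_to_cell_py := by
  intro i j _
  unfold Spec_interference_to_cell_py
  by_cases h1 : 0 ≤ i ∧ i ≤ 6 ∧ 0 ≤ j ∧ j ≤ 6
  · exact pvInRange i j h1.1 h1.2.1 h1.2.2.1 h1.2.2.2
  · rw [pvA_default i j (by omega), pvB_default i j (by omega)]
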